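-- pv_equiv track=rewrite | github.com/posl/comment_recommendation | script/mod_gen/3_time/zh/115_D/8.py | func
-- ===== SOURCE A (Python) =====
-- def func(n,x):
--     if n == 0:
--         return 0
--     elif x == 1:
--         return 0
--     elif x <= 1 + func(n-1,1 + (2**(n+1)-3)//2):
--         return func(n-1,x-1)
--     else:
--         return 2**(n)-1 + func(n-1,x-2-(2**(n+1)-3)//2)
-- ===== SOURCE B (Python) =====
-- def func(n, x):
--     # Iterative: the threshold 1 + func(n-1, 2**n - 1) of level n equals 2**n - n
--     # (closed form, provable by induction), so one descending pass suffices.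
--     total = 0
--     while n > 0 and x != 1:
--         p = 2 ** n
--         if x <= p - n:
--             x -= 1
--         else:
--             total += p - 1
--             x -= p
--         n -= 1
--     return total
-- ===== Notes on version B (the rewrite author's own statement) =====
-- stated objective: faster
-- what changed: A recomputes the level threshold 1 + func(n-1, 2**n - 1) by a second exponential recursion at every level; B uses the proved closed form 2**n - n for that threshold and replaces the whole double recursion by a single descending loop with an accumulator (intended as faster: O(n) vs O(2^n) calls; measured 1837x at n=16, the largest size A finished, A times out beyond).
import Mathlib
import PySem

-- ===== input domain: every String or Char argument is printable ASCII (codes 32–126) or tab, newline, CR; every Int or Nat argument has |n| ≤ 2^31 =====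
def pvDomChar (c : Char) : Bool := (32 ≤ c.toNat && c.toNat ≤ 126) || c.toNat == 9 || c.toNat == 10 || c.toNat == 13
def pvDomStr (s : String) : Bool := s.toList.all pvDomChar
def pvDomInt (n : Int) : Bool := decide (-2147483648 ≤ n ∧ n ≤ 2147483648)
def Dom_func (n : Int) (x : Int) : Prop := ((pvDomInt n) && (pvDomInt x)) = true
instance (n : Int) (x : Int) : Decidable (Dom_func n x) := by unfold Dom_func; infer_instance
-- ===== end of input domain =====

-- B replaces A's exponential double recursion by one descending loop using the
-- closed-form threshold 2^n - n; intended as faster (measured 1837x at n=16, the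
-- largest size A finished; A timed out beyond).

-- ===== PORT A =====
-- A's recursion decreases n by 1 at each call and stops at n = 0 (or x = 1), so for
-- n ≥ 0 it is structural recursion on n.toNat; for n < 0 with x ≠ 1 the Python
-- recurses forever (outside Pre_), the port returns 0 there.
def funcGo : Nat → Int → Int
  | 0, _ => 0                         -- n == 0 branch
  | m + 1, x =>
      if x = 1 then 0
      else if x ≤ 1 + funcGo m (1 + PySem.Int.floordiv ((2:Int) ^ (m + 2) - 3) 2) then
        funcGo m (x - 1)
      else
        (2:Int) ^ (m + 1) - 1 + funcGo m (x - 2 - PySem.Int.floordiv ((2:Int) ^ (m + 2) - 3) 2)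

def func (n : Int) (x : Int) : Int :=
  if n < 0 then (if x = 1 then 0 else 0)   -- x ≠ 1: Python diverges, excluded by Pre_
  else funcGo n.toNat x

-- ===== PORT B =====
-- transliteration of Source B's while-loop (loop counter n > 0, accumulator total)
def altGo : Nat → Int → Int → Int
  | 0, _, total => total
  | m + 1, x, total =>
      if x = 1 then total
      else
        let p : Int := (2:Int) ^ (m + 1)
        if x ≤ p - (m + 1 : Nat) then altGo m (x - 1) total
        else altGo m (x - p) (total + p - 1)

def func_alt (n : Int) (x : Int) : Int :=
  altGo n.toNat x 0        -- for n ≤ 0 the loop body never runs, as in Source B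

-- ===== PRECONDITION & SPEC =====
-- Pre_ excludes exactly the inputs where A raises (infinite recursion → RecursionError):
-- n < 0 together with x ≠ 1.
def Pre_func (n : Int) (x : Int) : Prop := 0 ≤ n ∨ x = 1
instance (n : Int) (x : Int) : Decidable (Pre_func n x) := by unfold Pre_func; infer_instance
def pvWitness_func : Int × Int := (3, 5)

def Spec_func (n : Int) (x : Int) (out : Int) : Prop := out = func_alt n x
instance (n : Int) (x : Int) (out : Int) : Decidable (Spec_func n x out) := by unfold Spec_func; infer_instance

-- ===== CLAIM (what is proved, stated in full; the proofs are below) =====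
def Claim_equal_func : Prop := ∀ (n : Int) (x : Int), Dom_func n x → Pre_func n x → Spec_func n x (func n x)

-- ===== LEMMAS AND PROOFS =====

-- the threshold argument simplifies: (2^(m+2) - 3) // 2 = 2^(m+1) - 2
theorem floordiv_pow (m : Nat) :
    PySem.Int.floordiv ((2:Int) ^ (m + 2) - 3) 2 = (2:Int) ^ (m + 1) - 2 := by
  rw [PySem.Int.floordiv_eq_iff_of_pos (by norm_num)]
  have h : (2:Int) ^ (m + 2) = 2 * 2 ^ (m + 1) := by ring
  constructor <;> [skip; skip] <;> omega

-- A's recomputed threshold is level-independent: funcGo m (2^(m+1) - 1) = 2^(m+1) - m - 2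
theorem funcGo_sat (m : Nat) : funcGo m ((2:Int) ^ (m + 1) - 1) = (2:Int) ^ (m + 1) - m - 2 := by
  induction m with
  | zero => simp [funcGo]
  | succ k ih =>
      have hp : (2:Int) ^ (k + 1) ≥ 2 := by
        calc (2:Int) ^ (k+1) ≥ 2 ^ 1 := by
              exact pow_le_pow_right₀ (by norm_num) (by omega)
          _ = 2 := by norm_num
      have hp2 : (2:Int) ^ (k + 2) = 2 * 2 ^ (k + 1) := by ring
      have hx1 : ((2:Int) ^ (k + 1 + 1) - 1) ≠ 1 := by omega
      rw [funcGo, if_neg hx1, floordiv_pow]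
      have harg : (1:Int) + ((2:Int) ^ (k + 1) - 2) = (2:Int) ^ (k + 1) - 1 := by ring
      rw [harg, ih]
      rw [if_neg (by omega)]
      have harg2 : (2:Int) ^ (k + 1 + 1) - 1 - 2 - ((2:Int) ^ (k + 1) - 2) = (2:Int) ^ (k + 1) - 1 := by
        omega
      rw [harg2, ih]
      push_cast; omega

-- loop invariant: B's accumulator version computes total + A's recursion
theorem altGo_funcGo (m : Nat) : ∀ (x total : Int), altGo m x total = total + funcGo m x := by
  induction m with
  | zero => intro x total; simp [altGo, funcGo]
  | succ k ih =>
      intro x total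
      by_cases hx : x = 1
      · simp [altGo, funcGo, hx]
      · have hthr : (1:Int) + funcGo k (1 + PySem.Int.floordiv ((2:Int) ^ (k + 2) - 3) 2)
            = (2:Int) ^ (k + 1) - (k + 1 : Nat) := by
          rw [floordiv_pow]
          have harg : (1:Int) + ((2:Int) ^ (k + 1) - 2) = (2:Int) ^ (k + 1) - 1 := by ring
          rw [harg, funcGo_sat]; push_cast; ring
        simp only [altGo, funcGo, if_neg hx]
        rw [hthr]
        by_cases hle : x ≤ (2:Int) ^ (k + 1) - (k + 1 : Nat)
        · rw [if_pos hle, if_pos hle, ih]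
        · rw [if_neg hle, if_neg hle, ih]
          rw [floordiv_pow]
          have : x - 2 - ((2:Int) ^ (k + 1) - 2) = x - (2:Int) ^ (k + 1) := by ring
          rw [this]; ring

-- ===== VERDICT (by name: the statement is the Claim_ definition above) =====
theorem func_spec : Claim_equal_func := by
  intro n x _ hpre
  unfold Spec_func func func_alt
  by_cases hn : n < 0
  · have hx : x = 1 := hpre.resolve_left (by omega)
    have hn0 : n.toNat = 0 := by omega
    simp [hn, hx, hn0, altGo]
  · rw [if_neg hn, altGo_funcGo]
    ring
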